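-- pv_equiv track=rewrite | github.com/Zhanghahah/Lavoisier | woshi_process/woshi_process_v1.py | smiles_map
-- ===== SOURCE A (Python) =====
-- def smiles_map(feat_list, name_smiles_dict):
--     if feat_list == "":
--         return feat_list
--     res = []
--     name_set = name_smiles_dict.keys()
--     for feat in feat_list:
--         if feat in name_set:
--             res.append(name_smiles_dict[feat])
--         else:
--             return ""
--     return res
-- ===== SOURCE B (Python) =====
-- def smiles_map(feat_list, name_smiles_dict):
--     if feat_list == "":
--         return feat_list
--     if all(feat in name_smiles_dict for feat in feat_list):
--         return [name_smiles_dict[feat] for feat in feat_list]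
--     return ""
-- ===== Notes on version B (the rewrite author's own statement) =====
-- stated objective: simpler
-- what changed: Replaces A's single fused loop (check-and-append with early return on a miss) by two separate passes: an all() validation pass over feat_list followed by a plain list comprehension that builds the result; B returns '' on a missing feature exactly like A.
-- outside the precondition, e.g. on smiles_map(['x'], {'a': 'C'}): A returns '', B returns ''
import Mathlib
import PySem

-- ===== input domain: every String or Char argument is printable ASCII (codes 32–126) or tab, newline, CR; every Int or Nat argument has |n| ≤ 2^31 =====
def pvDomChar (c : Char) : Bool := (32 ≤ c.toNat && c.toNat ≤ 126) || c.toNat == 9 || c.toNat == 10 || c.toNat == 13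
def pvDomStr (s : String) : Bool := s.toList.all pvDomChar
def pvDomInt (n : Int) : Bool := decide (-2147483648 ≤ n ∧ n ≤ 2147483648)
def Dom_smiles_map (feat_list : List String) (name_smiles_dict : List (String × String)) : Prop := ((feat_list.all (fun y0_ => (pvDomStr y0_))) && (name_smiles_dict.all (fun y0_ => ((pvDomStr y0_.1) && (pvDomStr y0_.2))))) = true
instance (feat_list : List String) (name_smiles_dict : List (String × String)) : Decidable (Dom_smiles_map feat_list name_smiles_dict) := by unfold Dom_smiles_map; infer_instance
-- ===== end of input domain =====

-- B validates all features in one pass, then builds the result in a second pass (simpler decomposition); return value only.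
-- Both programs return Python's "" (the empty/falsy result, ported as []) when a feature is missing.

-- ===== PORT A =====
-- fused loop: check membership, append on hit, bail out with "" on first miss
def smiles_map_go (d : List (String × String)) (res : List String) : List String → List String
  | [] => res
  | f :: rest =>
    match (PySem.Dict.mk d).get? f with
    | some v => smiles_map_go d (res ++ [v]) rest
    | none => []  -- Python's "" is the empty/falsy result; ported as []

def smiles_map (feat_list : List String) (name_smiles_dict : List (String × String)) : List String :=
  smiles_map_go name_smiles_dict [] feat_list
  -- the Python guard `if feat_list == "": return feat_list` can never fire for a list argument

-- ===== PORT B =====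
def smiles_map_alt (feat_list : List String) (name_smiles_dict : List (String × String)) : List String :=
  if feat_list.all (fun f => ((PySem.Dict.mk name_smiles_dict).get? f).isSome) then
    feat_list.map (fun f => (PySem.Dict.mk name_smiles_dict).getD f "")
  else []  -- Python's "" is the empty/falsy result; ported as []

-- ===== PRECONDITION & SPEC =====
-- Pre_ excludes inputs where some feature is missing from the dict: there Python A returns the STRING ""
-- (not a value of the declared list[str] return type, so no typed port can express it); Python B returns
-- the identical "" there — the exclusion is forced by the type convention, not a behavioural difference.
def Pre_smiles_map (feat_list : List String) (name_smiles_dict : List (String × String)) : Prop :=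
  feat_list.all (fun f => ((PySem.Dict.mk name_smiles_dict).get? f).isSome) = true
instance (feat_list : List String) (name_smiles_dict : List (String × String)) : Decidable (Pre_smiles_map feat_list name_smiles_dict) := by unfold Pre_smiles_map; infer_instance

def pvWitness_smiles_map : List String × (List (String × String)) := (["a", "b"], [("a", "CCO"), ("b", "N")])

def Spec_smiles_map (feat_list : List String) (name_smiles_dict : List (String × String)) (out : List String) : Prop := out = smiles_map_alt feat_list name_smiles_dict
instance (feat_list : List String) (name_smiles_dict : List (String × String)) (out : List String) : Decidable (Spec_smiles_map feat_list name_smiles_dict out) := by unfold Spec_smiles_map; infer_instance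

-- ===== CLAIM (what is proved, stated in full; the proofs are below) =====
def Claim_equal_smiles_map : Prop := ∀ (feat_list : List String) (name_smiles_dict : List (String × String)), Dom_smiles_map feat_list name_smiles_dict → Pre_smiles_map feat_list name_smiles_dict → Spec_smiles_map feat_list name_smiles_dict (smiles_map feat_list name_smiles_dict)

-- ===== LEMMAS AND PROOFS =====
theorem smiles_map_go_eq (d : List (String × String)) (l : List String) :
    ∀ res, smiles_map_go d res l =
      if l.all (fun f => ((PySem.Dict.mk d).get? f).isSome) then
        res ++ l.map (fun f => (PySem.Dict.mk d).getD f "")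
      else [] := by
  induction l with
  | nil => intro res; simp [smiles_map_go]
  | cons f rest ih =>
    intro res
    cases hv : (PySem.Dict.mk d).get? f with
    | none => simp [smiles_map_go, hv]
    | some v =>
      simp only [smiles_map_go, hv, List.all_cons]
      rw [ih (res ++ [v])]
      by_cases h : rest.all (fun f => ((PySem.Dict.mk d).get? f).isSome) = true
      · simp [h, hv, PySem.Dict.getD_eq_get?_getD]
      · simp [h]

-- ===== VERDICT (by name: the statement is the Claim_ definition above) =====
theorem smiles_map_spec : Claim_equal_smiles_map := by
  intro feat_list d _ hpre
  unfold Spec_smiles_map smiles_map smiles_map_alt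
  rw [smiles_map_go_eq d feat_list []]
  simp [hpre]
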